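-- pv_equiv track=rewrite | github.com/arthursc98/Faculdade | Pesquisa Operacional I/funcoes_po.py | menor_col
-- ===== SOURCE A (Python) =====
-- def menor_col(quadro):
--     menor = 0
--     index_coluna = 0
--     for i in range(len(quadro[0]) - 1):
--         if quadro[0][i] < menor:
--             menor = quadro[0][i]
--             index_coluna = i
--     return index_coluna
-- ===== SOURCE B (Python) =====
-- def menor_col(quadro):
--     row = quadro[0][:-1]
--     menor = min(row, default=0)
--     return row.index(menor) if menor < 0 else 0
-- ===== Notes on version B (the rewrite author's own statement) =====
-- stated objective: idiomatic
-- what changed: A's single loop tracking a running minimum and its index is replaced by slicing off the last column, taking min(row, default=0) in one pass, and locating it with row.index only when it is negative.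
import Mathlib
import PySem

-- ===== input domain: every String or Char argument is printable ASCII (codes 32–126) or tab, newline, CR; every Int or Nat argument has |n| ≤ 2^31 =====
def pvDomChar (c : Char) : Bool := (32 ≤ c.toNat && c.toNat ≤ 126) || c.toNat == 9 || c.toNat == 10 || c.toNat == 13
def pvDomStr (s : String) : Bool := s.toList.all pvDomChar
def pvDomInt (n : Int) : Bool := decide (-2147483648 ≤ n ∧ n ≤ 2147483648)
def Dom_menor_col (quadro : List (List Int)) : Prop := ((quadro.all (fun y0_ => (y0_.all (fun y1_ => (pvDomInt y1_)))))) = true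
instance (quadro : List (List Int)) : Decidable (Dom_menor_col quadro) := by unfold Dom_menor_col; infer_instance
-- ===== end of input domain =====

-- B replaces A's running min-and-index loop by: slice off the last column, take min(row, default=0),
-- and look up its first position only when it is negative (idiomatic two-pass decomposition; same O(n) cost).

-- ===== PORT A =====
-- for i in range(len(quadro[0]) - 1): if quadro[0][i] < menor: menor, index_coluna := quadro[0][i], i
def menor_col (quadro : List (List Int)) : Int :=
  let row := PySem.List.pyGetD quadro 0 []
  let res := (PySem.List.pyRange 0 ((row.length : Int) - 1) 1).foldl
    (fun (st : Int × Int) i =>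
      if PySem.List.pyGetD row i 0 < st.1 then (PySem.List.pyGetD row i 0, i) else st)
    (0, 0)
  res.2

-- ===== PORT B =====
-- row = quadro[0][:-1]; menor = min(row, default=0); return row.index(menor) if menor < 0 else 0
def menor_col_alt (quadro : List (List Int)) : Int :=
  let row := PySem.List.slice (PySem.List.pyGetD quadro 0 []) none (some (-1))
  let menor := PySem.List.minD row (fun y => y) 0
  if menor < 0 then
    match PySem.List.index? row menor with
    | some i => (i : Int)
    | none => 0
  else 0

-- ===== PRECONDITION & SPEC =====
-- Python A evaluates quadro[0], which raises IndexError exactly when quadro is empty.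
def Pre_menor_col (quadro : List (List Int)) : Prop := quadro ≠ []
instance (quadro : List (List Int)) : Decidable (Pre_menor_col quadro) := by unfold Pre_menor_col; infer_instance
def pvWitness_menor_col : List (List Int) := [[-3, 1, -5, 2]]

def Spec_menor_col (quadro : List (List Int)) (out : Int) : Prop := out = menor_col_alt quadro
instance (quadro : List (List Int)) (out : Int) : Decidable (Spec_menor_col quadro out) := by unfold Spec_menor_col; infer_instance

-- ===== CLAIM (what is proved, stated in full; the proofs are below) =====
def Claim_equal_menor_col : Prop := ∀ (quadro : List (List Int)), Dom_menor_col quadro → Pre_menor_col quadro → Spec_menor_col quadro (menor_col quadro)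

-- ===== LEMMAS AND PROOFS =====

-- the running minimum seeded with 0 is min 0 (running minimum seeded with the head)
lemma foldl_min_shift (l : List Int) (a b : Int) :
    List.foldl min (min a b) l = min a (List.foldl min b l) := by
  induction l generalizing b with
  | nil => rfl
  | cons d l ih => simpa [min_assoc] using ih (min b d)

lemma foldl_min_zero_le (r : List Int) : ∀ y ∈ r, r.foldl min 0 ≤ y := by
  have h := PySem.List.min?_id_cons (0 : Int) r
  intro y hy
  exact PySem.List.min?_isMin h y (by simp [hy])

lemma foldl_min_zero_nonpos (r : List Int) : r.foldl min 0 ≤ 0 := by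
  have h := PySem.List.min?_id_cons (0 : Int) r
  exact PySem.List.min?_isMin h 0 (by simp)

lemma foldl_min_zero_mem (r : List Int) (h : r.foldl min 0 < 0) : r.foldl min 0 ∈ r := by
  have hm := PySem.List.min?_mem (PySem.List.min?_id_cons (0 : Int) r)
  rcases List.mem_cons.mp hm with h0 | h1
  · omega
  · exact h1

-- characterisation of A's index loop over a row r (scanned in full)
lemma loopA_eq (r : List Int) :
    (PySem.List.pyRange 0 (r.length : Int) 1).foldl
      (fun (st : Int × Int) i =>
        if PySem.List.pyGetD r i 0 < st.1 then (PySem.List.pyGetD r i 0, i) else st) (0, 0)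
    = (r.foldl min 0,
       if r.foldl min 0 < 0 then ((PySem.List.index? r (r.foldl min 0)).getD 0 : Int) else 0) := by
  induction r using List.reverseRecOn with
  | nil => simp [PySem.List.pyRange_one_eq_nil (by omega : (0:Int) ≤ 0)]
  | append_singleton r x ih =>
    have hlen : ((r ++ [x]).length : Int) = (r.length : Int) + 1 := by simp
    rw [hlen, PySem.List.pyRange_one_succ_right (by positivity), List.foldl_append]
    have hcongr :
        (PySem.List.pyRange 0 (r.length : Int) 1).foldl
          (fun (st : Int × Int) i =>
            if PySem.List.pyGetD (r ++ [x]) i 0 < st.1 then (PySem.List.pyGetD (r ++ [x]) i 0, i) else st) (0, 0)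
        = (PySem.List.pyRange 0 (r.length : Int) 1).foldl
          (fun (st : Int × Int) i =>
            if PySem.List.pyGetD r i 0 < st.1 then (PySem.List.pyGetD r i 0, i) else st) (0, 0) := by
      apply PySem.List.foldl_congr_mem
      intro acc i hi
      have hi' := (PySem.List.mem_pyRange_one).1 hi
      have hget : PySem.List.pyGetD (r ++ [x]) i 0 = PySem.List.pyGetD r i 0 := by
        rw [PySem.List.pyGetD_eq_getElem _ 0 hi'.1 (by simp; omega),
            PySem.List.pyGetD_eq_getElem _ 0 hi'.1 (by exact_mod_cast hi'.2)]
        exact List.getElem_append_left (by omega)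
      rw [hget]
    rw [hcongr, ih]
    have hx : PySem.List.pyGetD (r ++ [x]) (r.length : Int) 0 = x := by
      rw [PySem.List.pyGetD_eq_getElem _ 0 (by positivity) (by simp)]
      simp
    set m := r.foldl min 0 with hm
    have hm0 : m ≤ 0 := foldl_min_zero_nonpos r
    have hfold : (r ++ [x]).foldl min 0 = min m x := by simp [hm]
    simp only [List.foldl_cons, List.foldl_nil, hx, hfold]
    by_cases hxm : x < m
    · have hxnr : x ∉ r := fun hmem => absurd (foldl_min_zero_le r x hmem) (by omega)
      have hidx := PySem.List.index?_append_singleton_self r x hxnr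
      rw [if_pos hxm, min_eq_right (le_of_lt hxm), if_pos (by omega : x < 0), hidx]
      simp
    · rw [if_neg hxm, min_eq_left (by omega : m ≤ x)]
      by_cases hneg : m < 0
      · have hmem : m ∈ r := foldl_min_zero_mem r hneg
        rw [PySem.List.index?_append_of_mem [x] hmem]
      · simp [hneg]

-- A scans quadro[0] up to index len-1, which is exactly scanning quadro[0][:-1] in full
lemma loop_row_eq (h : List Int) :
    (PySem.List.pyRange 0 ((h.length : Int) - 1) 1).foldl
      (fun (st : Int × Int) i =>
        if PySem.List.pyGetD h i 0 < st.1 then (PySem.List.pyGetD h i 0, i) else st) (0, 0)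
    = (PySem.List.pyRange 0 ((h.dropLast.length : Int)) 1).foldl
      (fun (st : Int × Int) i =>
        if PySem.List.pyGetD h.dropLast i 0 < st.1 then (PySem.List.pyGetD h.dropLast i 0, i) else st) (0, 0) := by
  cases h with
  | nil =>
    simp [PySem.List.pyRange_one_eq_nil (by omega : (-1:Int) ≤ 0),
          PySem.List.pyRange_one_eq_nil (by omega : (0:Int) ≤ 0)]
  | cons c s =>
    have hlen : ((c :: s).length : Int) - 1 = ((c :: s).dropLast.length : Int) := by simp
    rw [hlen]
    apply PySem.List.foldl_congr_mem
    intro acc i hi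
    have hi' := (PySem.List.mem_pyRange_one).1 hi
    have hb : i.toNat < (c :: s).dropLast.length := by
      have := hi'.2
      omega
    have hget : PySem.List.pyGetD (c :: s) i 0 = PySem.List.pyGetD (c :: s).dropLast i 0 := by
      rw [PySem.List.pyGetD_eq_getElem _ 0 hi'.1 (by simp at hi' ⊢; omega),
          PySem.List.pyGetD_eq_getElem _ 0 hi'.1 (by exact_mod_cast hi'.2)]
      exact (List.getElem_dropLast hb).symm
    rw [hget]

-- ===== VERDICT (by name: the statement is the Claim_ definition above) =====
theorem menor_col_spec : Claim_equal_menor_col := by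
  intro quadro _ hpre
  obtain ⟨h, t, rfl⟩ : ∃ h t, quadro = h :: t := by
    cases quadro with
    | nil => exact absurd rfl hpre
    | cons h t => exact ⟨h, t, rfl⟩
  unfold Spec_menor_col menor_col menor_col_alt
  simp only [PySem.List.pyGetD_zero_cons, PySem.List.slice_to_neg_one]
  rw [loop_row_eq, loopA_eq]
  cases hdl : h.dropLast with
  | nil => simp [PySem.List.minD]
  | cons c t =>
    have hminD : PySem.List.minD (c :: t) (fun y => y) 0 = t.foldl min c :=
      PySem.List.minD_id_cons c t 0
    have hfold : (c :: t).foldl min 0 = min 0 (t.foldl min c) := by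
      simpa using foldl_min_shift t 0 c
    simp only [hminD, hfold]
    by_cases hneg : t.foldl min c < 0
    · have hmm : min 0 (t.foldl min c) = t.foldl min c := min_eq_right (le_of_lt hneg)
      have hmem : t.foldl min c ∈ c :: t :=
        PySem.List.min?_mem (PySem.List.min?_id_cons c t)
      obtain ⟨k, hk⟩ := Option.isSome_iff_exists.mp
        ((PySem.List.index?_isSome_iff (c :: t) (t.foldl min c)).mpr hmem)
      rw [hmm, if_pos hneg, if_pos hneg, hk]
      simp
    · have hpos : ¬ min 0 (t.foldl min c) < 0 := by omega
      rw [if_neg hpos, if_neg hneg]
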